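-- pv_equiv track=rewrite | github.com/spriteboysz/LeetcodeSolution | LeetcodePython/algorithm/P2027. 转换字符串的最少操作次数.py | minimumMoves
-- ===== SOURCE A (Python) =====
-- def minimumMoves(s: str) -> int:
--     cnt, i = 0, 0
--     while i < len(s):
--         if s[i] == 'X':
--             cnt += 1
--             i += 3
--         else:
--             i += 1
--     return cnt
-- ===== SOURCE B (Python) =====
-- def minimumMoves(s: str) -> int:
--     n = len(s)
--     dp = [0] * (n + 3)
--     for i in reversed(range(n)):
--         dp[i] = 1 + dp[i + 3] if s[i] == 'X' else dp[i + 1]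
--     return dp[0]
-- ===== Notes on version B (the rewrite author's own statement) =====
-- stated objective: alternative
-- what changed: Replaces A's forward greedy scan with an index-jumping counter by a dynamic-programming table dp of size n+3 built back-to-front (dp[i] = 1 + dp[i+3] if s[i]=='X' else dp[i+1]), returning dp[0].
import Mathlib
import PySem

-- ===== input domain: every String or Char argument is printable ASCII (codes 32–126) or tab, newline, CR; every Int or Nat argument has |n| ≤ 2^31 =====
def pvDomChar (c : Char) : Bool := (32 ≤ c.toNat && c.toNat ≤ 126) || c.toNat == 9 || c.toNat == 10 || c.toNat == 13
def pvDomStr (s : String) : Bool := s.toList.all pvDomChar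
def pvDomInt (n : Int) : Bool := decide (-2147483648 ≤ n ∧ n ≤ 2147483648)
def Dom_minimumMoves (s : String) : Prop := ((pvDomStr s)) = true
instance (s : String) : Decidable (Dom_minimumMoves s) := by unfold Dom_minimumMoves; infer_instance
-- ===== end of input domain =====

-- B replaces A's forward greedy scan by a suffix DP table built back-to-front; alternative decomposition, same O(n) cost.

-- ===== PORT A =====
-- A's while loop: index i, counter cnt; 'X' at i adds one and jumps i+3, otherwise i+1
def minimumMovesLoop (cs : List Char) (i : Nat) (cnt : Int) : Int :=
  if h : i < cs.length then
    if cs[i] = 'X' then minimumMovesLoop cs (i + 3) (cnt + 1)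
    else minimumMovesLoop cs (i + 1) cnt
  else cnt
termination_by cs.length - i

def minimumMoves (s : String) : Int := minimumMovesLoop s.toList 0 0

-- ===== PORT B =====
-- one body of B's for-loop: dp[i] = 1 + dp[i+3] if s[i]=='X' else dp[i+1]
def minimumMovesDpStep (cs : List Char) (dp : List Int) (i : Nat) : List Int :=
  dp.set i (if cs.getD i ' ' = 'X' then 1 + dp.getD (i + 3) 0 else dp.getD (i + 1) 0)

def minimumMoves_alt (s : String) : Int :=
  let cs := s.toList
  let n := cs.length
  let dp := ((List.range n).reverse).foldl (minimumMovesDpStep cs) (List.replicate (n + 3) 0)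
  dp.getD 0 0

-- ===== PRECONDITION & SPEC =====
def Spec_minimumMoves (s : String) (out : Int) : Prop := out = minimumMoves_alt s
instance (s : String) (out : Int) : Decidable (Spec_minimumMoves s out) := by unfold Spec_minimumMoves; infer_instance

-- ===== CLAIM (what is proved, stated in full; the proofs are below) =====
def Claim_equal_minimumMoves : Prop := ∀ (s : String), Dom_minimumMoves s → Spec_minimumMoves s (minimumMoves s)

-- ===== LEMMAS AND PROOFS =====

-- accumulator lemma for A's loop
theorem loop_acc (cs : List Char) (i : Nat) (cnt : Int) :
    minimumMovesLoop cs i cnt = cnt + minimumMovesLoop cs i 0 := by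
  conv_lhs => rw [minimumMovesLoop]
  conv_rhs => rw [minimumMovesLoop]
  by_cases h : i < cs.length
  · rw [dif_pos h, dif_pos h]
    by_cases hc : cs[i] = 'X'
    · rw [if_pos hc, if_pos hc, loop_acc cs (i + 3) (cnt + 1), loop_acc cs (i + 3) (0 + 1)]
      ring
    · rw [if_neg hc, if_neg hc, loop_acc cs (i + 1) cnt]
  · rw [dif_neg h, dif_neg h]; ring
termination_by cs.length - i

-- A's loop from an index past the end is 0
theorem loop_past (cs : List Char) (i : Nat) (h : cs.length ≤ i) :
    minimumMovesLoop cs i 0 = 0 := by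
  rw [minimumMovesLoop, dif_neg (by omega)]

-- invariant for B's back-to-front fold: if dp already agrees with the loop on indices ≥ m,
-- then folding over [m-1, …, 0] yields agreement everywhere
theorem fold_inv (cs : List Char) (m : Nat) (dp : List Int)
    (hm : m ≤ cs.length) (hlen : dp.length = cs.length + 3)
    (hdp : ∀ j, m ≤ j → dp.getD j 0 = minimumMovesLoop cs j 0) :
    ∀ j, (((List.range m).reverse).foldl (minimumMovesDpStep cs) dp).getD j 0
        = minimumMovesLoop cs j 0 := by
  induction m generalizing dp with
  | zero => intro j; simpa using hdp j (Nat.zero_le j)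
  | succ m ih =>
    have hrange : (List.range (m + 1)).reverse = m :: (List.range m).reverse := by
      rw [List.range_succ, List.reverse_append]; rfl
    rw [hrange, List.foldl_cons]
    have hmlt : m < cs.length := by omega
    have hset : (minimumMovesDpStep cs dp m).length = cs.length + 3 := by
      simp [minimumMovesDpStep, hlen]
    refine ih (minimumMovesDpStep cs dp m) (by omega) hset ?_
    intro j hj
    rcases Nat.eq_or_lt_of_le hj with rfl | hj
    · have hgd : (minimumMovesDpStep cs dp m).getD m 0
          = (if cs.getD m ' ' = 'X' then 1 + dp.getD (m + 3) 0 else dp.getD (m + 1) 0) := by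
        have hl : m < dp.length := by omega
        simp [minimumMovesDpStep, List.getD, hl]
      rw [hgd]
      have hcd : cs.getD m ' ' = cs[m] := List.getD_eq_getElem cs ' ' hmlt
      rw [minimumMovesLoop, dif_pos hmlt, hcd]
      by_cases hc : cs[m] = 'X'
      · rw [if_pos hc, if_pos hc, loop_acc cs (m + 3) (0 + 1), hdp (m + 3) (by omega)]
        ring
      · rw [if_neg hc, if_neg hc, hdp (m + 1) (by omega)]
    · have : (minimumMovesDpStep cs dp m).getD j 0 = dp.getD j 0 := by
        simp [minimumMovesDpStep, List.getD, List.getElem?_set_ne (by omega : m ≠ j)]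
      rw [this]; exact hdp j (by omega)

-- ===== VERDICT (by name: the statement is the Claim_ definition above) =====
theorem minimumMoves_spec : Claim_equal_minimumMoves := by
  intro s _
  unfold Spec_minimumMoves minimumMoves minimumMoves_alt
  have h := fold_inv s.toList s.toList.length (List.replicate (s.toList.length + 3) 0)
    le_rfl (by simp) ?_ 0
  · exact h.symm
  · intro j hj
    rw [loop_past s.toList j hj]
    simp [List.getD]
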